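-- pv_equiv track=rewrite | github.com/foreheadSniffer/homework | lab1.py | getSmallestRepetitiveSubstring
-- ===== SOURCE A (Python) =====
-- def getSmallestRepetitiveSubstring(str):
--     ss = ''
--     for j in range(int(len(str)/2 +1)) :
--         ss+=str[j]
--         substring = ''
--         for i in range(int(len(str)/len(ss))):
--             substring+=ss
--         if str == substring and len(str) != len(ss):
--             return (int(len(str)/len(ss)))
--
--     return 1
-- ===== SOURCE B (Python) =====
-- def getSmallestRepetitiveSubstring(str):
--     n = len(str)
--     for k in range(n, 1, -1):          # candidate repetition counts, largest first
--         if n % k == 0: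
--             d = n // k                 # candidate period length
--             if all(str[i] == str[i - d] for i in range(d, n)):
--                 return k
--     return 1
-- ===== Notes on version B (the rewrite author's own statement) =====
-- stated objective: faster
-- what changed: B enumerates only the candidate repetition counts k = n..2 (largest first), keeps those dividing n, and checks periodicity by the pointwise comparison s[i] == s[i-d]; A instead tries every prefix length up to n/2, materialising a candidate string by repeated concatenation and comparing whole strings.
import Mathlib
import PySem

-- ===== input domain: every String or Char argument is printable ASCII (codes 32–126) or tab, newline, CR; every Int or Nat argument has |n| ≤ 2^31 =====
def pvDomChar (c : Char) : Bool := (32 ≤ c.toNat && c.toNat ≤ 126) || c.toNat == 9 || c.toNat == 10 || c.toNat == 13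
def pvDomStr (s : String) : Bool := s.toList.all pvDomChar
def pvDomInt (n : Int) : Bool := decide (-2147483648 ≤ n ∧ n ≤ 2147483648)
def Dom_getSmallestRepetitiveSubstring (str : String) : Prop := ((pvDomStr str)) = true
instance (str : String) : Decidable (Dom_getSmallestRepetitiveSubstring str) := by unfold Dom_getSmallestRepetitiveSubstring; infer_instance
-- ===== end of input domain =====

-- B replaces A's try-every-prefix-length string building with a divisor enumeration (largest
-- repetition count first) plus a pointwise periodicity check; faster (fewer candidates, no
-- string materialisation). Equivalence of the RETURN value is proved for nonempty strings
-- (A raises IndexError on "").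

-- ===== PORT A =====
def pvALoop (l : List Char) (js : List Int) (ss : List Char) : Int :=
  match js with
  | [] => 1
  | j :: rest =>
    match PySem.List.pyGet? l j with
    | none => 1  -- Python raises IndexError here (reachable only for str = ""); excluded by Pre_
    | some c =>
      let ss2 := ss ++ [c]
      let sub := (PySem.List.pyRange 0 ((l.length / ss2.length : Nat) : Int) 1).foldl
                   (fun acc _ => acc ++ ss2) ([] : List Char)
      if l = sub ∧ l.length ≠ ss2.length then ((l.length / ss2.length : Nat) : Int)
      else pvALoop l rest ss2

def getSmallestRepetitiveSubstring (str : String) : Int :=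
  pvALoop str.toList (PySem.List.pyRange 0 ((str.toList.length / 2 + 1 : Nat) : Int) 1) []

-- ===== PORT B =====
def pvBCheck (l : List Char) (n : Nat) (d : Int) : Bool :=
  (PySem.List.pyRange d (n : Int) 1).all
    (fun i => PySem.List.pyGet? l i == PySem.List.pyGet? l (i - d))

def pvBLoop (l : List Char) (n : Nat) (ks : List Int) : Int :=
  match ks with
  | [] => 1
  | k :: rest =>
    if PySem.Int.mod (n : Int) k = 0 then
      if pvBCheck l n (PySem.Int.floordiv (n : Int) k) then k else pvBLoop l n rest
    else pvBLoop l n rest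

def getSmallestRepetitiveSubstring_alt (str : String) : Int :=
  pvBLoop str.toList str.toList.length (PySem.List.pyRange (str.toList.length : Int) 1 (-1))

-- ===== PRECONDITION & SPEC =====
-- Pre_ excludes only the empty string, on which A raises IndexError (str[0]).
def Pre_getSmallestRepetitiveSubstring (str : String) : Prop := str ≠ ""
instance (str : String) : Decidable (Pre_getSmallestRepetitiveSubstring str) := by
  unfold Pre_getSmallestRepetitiveSubstring; infer_instance
def pvWitness_getSmallestRepetitiveSubstring : String := "abab"

def Spec_getSmallestRepetitiveSubstring (str : String) (out : Int) : Prop := out = getSmallestRepetitiveSubstring_alt str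
instance (str : String) (out : Int) : Decidable (Spec_getSmallestRepetitiveSubstring str out) := by unfold Spec_getSmallestRepetitiveSubstring; infer_instance

-- ===== CLAIM (what is proved, stated in full; the proofs are below) =====
def Claim_equal_getSmallestRepetitiveSubstring : Prop := ∀ (str : String), Dom_getSmallestRepetitiveSubstring str → Pre_getSmallestRepetitiveSubstring str → Spec_getSmallestRepetitiveSubstring str (getSmallestRepetitiveSubstring str)

-- ===== LEMMAS AND PROOFS =====

-- l is d-periodic (as checked pointwise by B)
def pvPerio (l : List Char) (d : Nat) : Prop := l.drop d = l.take (l.length - d)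

-- the candidate string A builds for prefix length L
def pvRepCat (l : List Char) (L : Nat) : List Char :=
  (List.replicate (l.length / L) (l.take L)).flatten

def pvCondA (l : List Char) (L : Nat) : Bool :=
  decide (l = pvRepCat l L ∧ l.length ≠ L)

def pvCondB (l : List Char) (k : Nat) : Bool :=
  decide (PySem.Int.mod (l.length : Int) (k : Int) = 0) &&
    pvBCheck l l.length (PySem.Int.floordiv (l.length : Int) (k : Int))

lemma pv_foldl_const_append (m : List Int) (t acc : List Char) :
    m.foldl (fun a _ => a ++ t) acc = acc ++ (List.replicate m.length t).flatten := by
  induction m generalizing acc with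
  | nil => simp
  | cons x xs ih => simp [List.foldl_cons, ih, List.replicate_succ]

lemma pv_len_flatten_replicate (m : Nat) (t : List Char) :
    ((List.replicate m t).flatten).length = m * t.length := by
  induction m with
  | zero => simp
  | succ k ih => simp [List.replicate_succ, ih]; ring

-- A's loop computes the first prefix length L (ascending) passing A's test
lemma pvALoop_eq (l : List Char) : ∀ (m j₀ : Nat), j₀ + m ≤ l.length →
    pvALoop l ((List.range' j₀ m).map Int.ofNat) (l.take j₀) =
      (match (List.range' (j₀+1) m).find? (pvCondA l) with
       | some L => ((l.length / L : Nat) : Int)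
       | none => 1) := by
  intro m
  induction m with
  | zero => intro j₀ h; simp [pvALoop]
  | succ m ih =>
    intro j₀ h
    have hj : j₀ < l.length := by omega
    have hss : (l.take (j₀+1)).length = j₀ + 1 := by
      simp [min_eq_left (by omega : j₀ + 1 ≤ l.length)]
    have htk : l.take j₀ ++ [l[j₀]] = l.take (j₀+1) := by
      rw [List.take_add_one, List.getElem?_eq_getElem hj]; simp
    rw [List.range'_succ, List.map_cons]
    simp only [pvALoop, Int.ofNat_eq_natCast]
    rw [PySem.List.pyGet?_ofNat l j₀ hj]
    simp only [htk, hss]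
    rw [pv_foldl_const_append]
    simp only [PySem.List.length_pyRange_one, List.nil_append, Int.sub_zero, Int.toNat_natCast]
    by_cases hc :
        l = (List.replicate (l.length / (j₀ + 1)) (List.take (j₀ + 1) l)).flatten ∧
          l.length ≠ j₀ + 1
    · have hca : pvCondA l (j₀ + 1) = true := by
        unfold pvCondA pvRepCat; exact decide_eq_true hc
      rw [List.range'_succ, List.find?_cons_of_pos hca, if_pos hc]
    · have hca : ¬ pvCondA l (j₀ + 1) = true := by
        unfold pvCondA pvRepCat; simpa using hc
      rw [List.range'_succ, List.find?_cons_of_neg (by simpa using hca), if_neg hc]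
      exact ih (j₀ + 1) (by omega)

-- B's loop computes the first k (in list order) passing B's test
lemma pvBLoop_eq (l : List Char) : ∀ (ks : List Nat),
    pvBLoop l l.length (ks.map Int.ofNat) =
      (match ks.find? (pvCondB l) with
       | some k => (k : Int)
       | none => 1) := by
  intro ks
  induction ks with
  | nil => simp [pvBLoop]
  | cons k rest ih =>
    by_cases hm : PySem.Int.mod (l.length : Int) (k : Int) = 0
    · by_cases hc : pvBCheck l l.length (PySem.Int.floordiv (l.length : Int) (k : Int)) = true
      · have hcb : pvCondB l k = true := by
          unfold pvCondB; rw [Bool.and_eq_true, decide_eq_true_iff]; exact ⟨hm, hc⟩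
        simp only [List.map_cons, pvBLoop, Int.ofNat_eq_natCast, if_pos hm, if_pos hc,
          List.find?_cons_of_pos hcb]
      · have hcb : ¬ pvCondB l k = true := by
          unfold pvCondB; rw [Bool.and_eq_true, decide_eq_true_iff]; rintro ⟨-, h⟩; exact hc h
        simp only [List.map_cons, pvBLoop, Int.ofNat_eq_natCast, if_pos hm, if_neg hc,
          List.find?_cons_of_neg (by simpa using hcb)]
        exact ih
    · have hcb : ¬ pvCondB l k = true := by
        unfold pvCondB; rw [Bool.and_eq_true, decide_eq_true_iff]; rintro ⟨h, -⟩; exact hm h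
      simp only [List.map_cons, pvBLoop, Int.ofNat_eq_natCast, if_neg hm,
        List.find?_cons_of_neg (by simpa using hcb)]
      exact ih

-- pointwise periodicity check = drop/take equation
lemma pv_pointwise_iff (l : List Char) (d : Nat) (hd : d ≤ l.length) :
    (∀ i : Nat, d ≤ i → i < l.length → l[i]? = l[i - d]?) ↔ pvPerio l d := by
  constructor
  · intro h
    apply List.ext_getElem?
    intro j
    rw [List.getElem?_drop]
    by_cases hj : j < l.length - d
    · rw [List.getElem?_take_of_lt hj]
      have := h (d + j) (by omega) (by omega)
      simpa [Nat.add_sub_cancel_left] using this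
    · rw [List.getElem?_take_eq_none (by omega), List.getElem?_eq_none (by omega)]
  · intro h i hdi hin
    have h1 : l[i]? = (l.drop d)[i - d]? := by
      rw [List.getElem?_drop]; congr 1; omega
    rw [h1, h, List.getElem?_take_of_lt (by omega)]

lemma pvBCheck_iff (l : List Char) (d : Nat) (hd : d ≤ l.length) :
    pvBCheck l l.length (d : Int) = true ↔ pvPerio l d := by
  rw [← pv_pointwise_iff l d hd]
  unfold pvBCheck
  rw [List.all_eq_true]
  constructor
  · intro h i hdi hin
    have hm : (i : Int) ∈ PySem.List.pyRange (d : Int) (l.length : Int) 1 := by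
      rw [PySem.List.mem_pyRange_one]; constructor <;> exact_mod_cast (by omega : _)
    have := h _ hm
    rw [beq_iff_eq] at this
    have hc : ((i : Int) - (d : Int)) = ((i - d : Nat) : Int) := by omega
    rw [hc, PySem.List.pyGet?_natCast, PySem.List.pyGet?_natCast] at this
    exact this
  · intro h i hm
    rw [PySem.List.mem_pyRange_one] at hm
    obtain ⟨h1, h2⟩ := hm
    have hi0 : 0 ≤ i := le_trans (by exact_mod_cast Nat.zero_le d) h1
    set j := i.toNat with hj
    have hij : (j : Int) = i := Int.toNat_of_nonneg hi0
    have hdj : d ≤ j := by omega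
    have hjn : j < l.length := by omega
    rw [beq_iff_eq, ← hij]
    have hc : ((j : Int) - (d : Int)) = ((j - d : Nat) : Int) := by omega
    rw [hc, PySem.List.pyGet?_natCast, PySem.List.pyGet?_natCast]
    exact h j hdj hjn

-- A's string equation = divisibility + periodicity
-- backward direction of pv_repEq_iff, by strong induction on the length
lemma pv_rep_of_perio : ∀ (n : Nat), ∀ (l : List Char), l.length = n → ∀ L, 1 ≤ L → L ∣ n →
    l.drop L = l.take (n - L) → l = (List.replicate (n / L) (l.take L)).flatten := by
  intro n
  induction n using Nat.strong_induction_on with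
  | _ n ih =>
    intro l hlen L hL hdvd hper
    rcases Nat.lt_or_ge n L with hnl | hln
    · have hn0 : n = 0 := by
        rcases Nat.eq_zero_or_pos n with h | h
        · exact h
        · exact absurd (Nat.le_of_dvd h hdvd) (by omega)
      have hnil : l = [] := List.eq_nil_of_length_eq_zero (by omega)
      subst hnil
      simp [hn0, Nat.zero_div]
    · rcases eq_or_lt_of_le hln with heq | hlt
      · -- L = n : one block
        have hdiv1 : n / L = 1 := by rw [heq, Nat.div_self (by omega)]
        rw [hdiv1]
        simp [List.take_of_length_le (by omega : l.length ≤ L)]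
      · -- L < n : peel one block and recurse on l.drop L
        have h2L : 2 * L ≤ n := by
          obtain ⟨m, hm⟩ := hdvd
          have hm2 : 2 ≤ m := by
            rcases Nat.lt_or_ge m 2 with h | h
            · interval_cases m <;> omega
            · exact h
          calc 2 * L ≤ m * L := by exact Nat.mul_le_mul_right L hm2
            _ = n := by rw [hm]; ring
        have hlen' : (l.drop L).length = n - L := by simp [hlen]
        have hdvd' : L ∣ (n - L) := Nat.dvd_sub hdvd dvd_rfl
        have hper' : (l.drop L).drop L = (l.drop L).take ((n - L) - L) := by
          calc (l.drop L).drop L = (l.take (n - L)).drop L := by rw [hper]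
            _ = (l.drop L).take ((n - L) - L) := by rw [List.drop_take]
        have ihl' := ih (n - L) (by omega) (l.drop L) hlen' L hL hdvd' hper'
        have htake : (l.drop L).take L = l.take L := by
          rw [hper, List.take_take, min_eq_left (by omega)]
        obtain ⟨m, hm⟩ := hdvd
        have hm0 : 0 < L := by omega
        have hmn : n / L = m := by rw [hm, Nat.mul_comm, Nat.mul_div_cancel _ hm0]
        have hmn' : (n - L) / L = m - 1 := by
          have e : n - L = (m - 1) * L := by
            have h3 : m * L - L = (m - 1) * L := by rw [Nat.sub_one_mul]
            have h4 : n = m * L := by rw [hm]; ring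
            omega
          rw [e, Nat.mul_div_cancel _ hm0]
        have hm1 : 2 ≤ m := by
          have := h2L
          rcases Nat.lt_or_ge m 2 with h | h
          · exfalso; interval_cases m <;> omega
          · exact h
        calc l = l.take L ++ l.drop L := (List.take_append_drop L l).symm
          _ = l.take L ++ (List.replicate ((n - L) / L) ((l.drop L).take L)).flatten := by
              rw [← ihl']
          _ = l.take L ++ (List.replicate (m - 1) (l.take L)).flatten := by
              rw [htake, hmn']
          _ = (List.replicate ((m - 1) + 1) (l.take L)).flatten := by
              rw [List.replicate_succ, List.flatten_cons]
          _ = (List.replicate (n / L) (l.take L)).flatten := by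
              have hms : (m - 1) + 1 = m := by omega
              rw [hms, hmn]

lemma pv_repEq_iff (l : List Char) (L : Nat) (h1 : 1 ≤ L) (h2 : L ≤ l.length) :
    l = pvRepCat l L ↔ (L ∣ l.length ∧ pvPerio l L) := by
  constructor
  · intro h
    have hlt : (l.take L).length = L := by simp [min_eq_left h2]
    have hlen2 : l.length = (l.length / L) * L := by
      conv_lhs => rw [h]
      unfold pvRepCat
      rw [pv_len_flatten_replicate, hlt]
    have hdvd : L ∣ l.length := by
      apply Nat.dvd_of_mod_eq_zero
      have h1' := Nat.mod_add_div' l.length L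
      rw [← hlen2] at h1'
      omega
    refine ⟨hdvd, ?_⟩
    have hm1 : 1 ≤ l.length / L := (Nat.one_le_div_iff (by omega)).mpr h2
    obtain ⟨m', hm'⟩ : ∃ m', l.length / L = m' + 1 := ⟨l.length / L - 1, by omega⟩
    have e1 : pvRepCat l L = l.take L ++ (List.replicate m' (l.take L)).flatten := by
      unfold pvRepCat; rw [hm', List.replicate_succ, List.flatten_cons]
    have e2 : pvRepCat l L = (List.replicate m' (l.take L)).flatten ++ l.take L := by
      unfold pvRepCat; rw [hm', List.replicate_succ', List.flatten_append]; simp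
    have hlenm : l.length = m' * L + L := by
      have h3 : (m' + 1) * L = m' * L + L := by rw [Nat.succ_mul]
      rw [hlen2, hm', h3]
    have hd : l.drop L = (List.replicate m' (l.take L)).flatten := by
      conv_lhs => rw [h, e1]
      exact List.drop_left' hlt
    have hfl : ((List.replicate m' (l.take L)).flatten).length = l.length - L := by
      rw [pv_len_flatten_replicate, hlt]; omega
    have ht : l.take (l.length - L) = (List.replicate m' (l.take L)).flatten := by
      have step : l.take (l.length - L) =
          ((List.replicate m' (l.take L)).flatten ++ l.take L).take (l.length - L) := by
        congr 1
        exact h.trans e2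
      rw [step, List.take_left' hfl]
    exact hd.trans ht.symm
  · rintro ⟨hdvd, hper⟩
    exact pv_rep_of_perio l.length l rfl L h1 hdvd hper

lemma pvCondA_iff (l : List Char) (L : Nat) (h1 : 1 ≤ L) (h2 : L ≤ l.length) :
    pvCondA l L = true ↔ (L ∣ l.length ∧ L ≠ l.length ∧ pvPerio l L) := by
  unfold pvCondA
  rw [decide_eq_true_iff, pv_repEq_iff l L h1 h2]
  constructor
  · rintro ⟨⟨a, b⟩, c⟩; exact ⟨a, fun h => c h.symm, b⟩
  · rintro ⟨a, c, b⟩; exact ⟨⟨a, b⟩, fun h => c h.symm⟩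

lemma pvCondB_iff (l : List Char) (k : Nat) (h1 : 2 ≤ k) (h2 : k ≤ l.length) :
    pvCondB l k = true ↔ (k ∣ l.length ∧ pvPerio l (l.length / k)) := by
  unfold pvCondB
  rw [Bool.and_eq_true, decide_eq_true_iff, PySem.Int.mod_natCast,
    PySem.Int.floordiv_natCast, pvBCheck_iff l (l.length / k) (Nat.div_le_self _ _)]
  constructor
  · rintro ⟨a, b⟩
    refine ⟨Nat.dvd_of_mod_eq_zero ?_, b⟩
    exact_mod_cast a
  · rintro ⟨a, b⟩
    refine ⟨?_, b⟩
    have : l.length % k = 0 := Nat.dvd_iff_mod_eq_zero.mp a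
    exact_mod_cast this

lemma pv_find?_pairwise {r : Nat → Nat → Prop} {p : Nat → Bool} {a : Nat} :
    ∀ {l : List Nat}, l.Pairwise r → l.find? p = some a →
      p a = true ∧ a ∈ l ∧ ∀ b ∈ l, p b = true → a = b ∨ r a b := by
  intro l hs hf
  induction l with
  | nil => simp at hf
  | cons x t ih =>
    rcases List.pairwise_cons.mp hs with ⟨hx, ht⟩
    by_cases hpx : p x = true
    · rw [List.find?_cons_of_pos hpx] at hf
      obtain rfl : x = a := by simpa using hf
      refine ⟨hpx, by simp, ?_⟩
      intro b hb _
      rcases List.mem_cons.mp hb with rfl | hb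
      · exact Or.inl rfl
      · exact Or.inr (hx b hb)
    · rw [List.find?_cons_of_neg (by simpa using hpx)] at hf
      obtain ⟨h1, h2, h3⟩ := ih ht hf
      refine ⟨h1, List.mem_cons_of_mem _ h2, ?_⟩
      intro b hb hpb
      rcases List.mem_cons.mp hb with rfl | hb
      · exact absurd hpb hpx
      · exact h3 b hb hpb

-- ===== VERDICT (by name: the statement is the Claim_ definition above) =====
-- arithmetic facts about complementary divisors, used by the final assembly
lemma pv_codiv_facts (n d : Nat) (hn : 1 ≤ n) (h1 : 1 ≤ d) (hdvd : d ∣ n) (hne : d ≠ n) :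
    2 ≤ n / d ∧ n / d ≤ n ∧ n / d ∣ n ∧ n / (n / d) = d ∧ d ≤ n / 2 := by
  obtain ⟨m, hm⟩ := hdvd
  have hq : n / d = m := by rw [hm, Nat.mul_comm, Nat.mul_div_cancel _ (by omega)]
  have hm2 : 2 ≤ m := by
    rcases Nat.lt_or_ge m 2 with h | h
    · interval_cases m <;> omega
    · exact h
  refine ⟨by omega, by rw [hq]; nlinarith, ?_, ?_, ?_⟩
  · exact Nat.div_dvd_of_dvd ⟨m, hm⟩
  · exact Nat.div_div_self ⟨m, hm⟩ (by omega)
  · -- d ≤ n / 2 : n = d * m ≥ d * 2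
    have : 2 * d ≤ n := by nlinarith
    omega

lemma pv_div_facts (n k : Nat) (hn : 1 ≤ n) (h2 : 2 ≤ k) (hk : k ≤ n) (hdvd : k ∣ n) :
    1 ≤ n / k ∧ n / k ∣ n ∧ n / k ≠ n ∧ n / (n / k) = k ∧ n / k ≤ n / 2 := by
  have h1 : 1 ≤ n / k := (Nat.one_le_div_iff (by omega)).mpr hk
  have hle : n / k ≤ n / 2 := Nat.div_le_div_left h2 (by omega)
  refine ⟨h1, Nat.div_dvd_of_dvd hdvd, by omega, Nat.div_div_self hdvd (by omega), hle⟩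

theorem getSmallestRepetitiveSubstring_spec : Claim_equal_getSmallestRepetitiveSubstring := by
  intro str _ hpre
  unfold Spec_getSmallestRepetitiveSubstring
  unfold getSmallestRepetitiveSubstring getSmallestRepetitiveSubstring_alt
  have hln : str.toList ≠ [] := fun h => hpre (String.toList_eq_nil_iff.mp h)
  set l := str.toList with hl
  have hn1 : 1 ≤ l.length := by
    have := List.length_pos_of_ne_nil hln
    omega
  -- A's side: first prefix length in 1..n/2+1 passing A's test
  have hA : pvALoop l (PySem.List.pyRange 0 ((l.length / 2 + 1 : Nat) : Int) 1) [] =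
      (match (List.range' 1 (l.length / 2 + 1)).find? (pvCondA l) with
       | some L => ((l.length / L : Nat) : Int)
       | none => 1) := by
    have hmap : PySem.List.pyRange 0 ((l.length / 2 + 1 : Nat) : Int) 1 =
        (List.range' 0 (l.length / 2 + 1)).map Int.ofNat := by
      rw [PySem.List.pyRange_one]
      have ht : (((l.length / 2 + 1 : Nat) : Int) - 0).toNat = l.length / 2 + 1 := by omega
      rw [ht, List.range'_eq_map_range, List.map_map]
      apply List.map_congr_left
      intro x hx
      simp
    rw [hmap]
    simpa using pvALoop_eq l (l.length / 2 + 1) 0 (by omega)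
  -- B's side: first k in n, n-1, ..., 2 passing B's test
  have hB : pvBLoop l l.length (PySem.List.pyRange (l.length : Int) 1 (-1)) =
      (match ((List.range' 2 (l.length - 1)).reverse).find? (pvCondB l) with
       | some k => (k : Int)
       | none => 1) := by
    have h2 : PySem.List.pyRange (1 + 1) ((l.length : Int) + 1) 1 =
        (List.range' 2 (l.length - 1)).map Int.ofNat := by
      rw [PySem.List.pyRange_one, List.range'_eq_map_range, List.map_map]
      have ht : (((l.length : Int) + 1) - (1 + 1)).toNat = l.length - 1 := by omega
      rw [ht]
      apply List.map_congr_left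
      intro x hx
      simp [Function.comp]
    have hks : PySem.List.pyRange (l.length : Int) 1 (-1) =
        ((List.range' 2 (l.length - 1)).reverse).map Int.ofNat := by
      rw [PySem.List.pyRange_neg_one_eq_reverse, h2, List.map_reverse]
    rw [hks]
    exact pvBLoop_eq l ((List.range' 2 (l.length - 1)).reverse)
  rw [hA, hB]
  have hpa : (List.range' 1 (l.length / 2 + 1)).Pairwise (· < ·) :=
    List.pairwise_lt_range' 1 (by norm_num)
  have hpb : ((List.range' 2 (l.length - 1)).reverse).Pairwise (· > ·) := by
    rw [List.pairwise_reverse]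
    exact List.pairwise_lt_range' 1 (by norm_num)
  cases hfa : (List.range' 1 (l.length / 2 + 1)).find? (pvCondA l) with
  | none =>
    cases hfb : ((List.range' 2 (l.length - 1)).reverse).find? (pvCondB l) with
    | none => rfl
    | some k =>
      exfalso
      obtain ⟨hck, hkm, -⟩ := pv_find?_pairwise hpb hfb
      have hkr : 2 ≤ k ∧ k ≤ l.length := by
        rw [List.mem_reverse, List.mem_range'_1] at hkm
        omega
      obtain ⟨hdvd, hper⟩ := (pvCondB_iff l k hkr.1 hkr.2).mp hck
      obtain ⟨h1, h2, h3, h4, h5⟩ := pv_div_facts l.length k hn1 hkr.1 hkr.2 hdvd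
      have hcd : pvCondA l (l.length / k) = true :=
        (pvCondA_iff l (l.length / k) h1 (by omega)).mpr ⟨h2, h3, hper⟩
      have hmem : l.length / k ∈ List.range' 1 (l.length / 2 + 1) := by
        rw [List.mem_range'_1]
        omega
      exact absurd hcd ((List.find?_eq_none.mp hfa) _ hmem)
  | some d =>
    obtain ⟨hcd, hdm, hmin⟩ := pv_find?_pairwise hpa hfa
    have hdr : 1 ≤ d ∧ d ≤ l.length / 2 + 1 := by
      rw [List.mem_range'_1] at hdm
      omega
    obtain ⟨hdvd, hne, hper⟩ := (pvCondA_iff l d hdr.1 (by omega)).mp hcd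
    obtain ⟨hk2, hkn, hkdvd, hkk, hd2⟩ := pv_codiv_facts l.length d hn1 hdr.1 hdvd hne
    have hck : pvCondB l (l.length / d) = true := by
      apply (pvCondB_iff l (l.length / d) hk2 hkn).mpr
      refine ⟨hkdvd, ?_⟩
      rw [hkk]
      exact hper
    have hmemk : l.length / d ∈ (List.range' 2 (l.length - 1)).reverse := by
      rw [List.mem_reverse, List.mem_range'_1]
      omega
    cases hfb : ((List.range' 2 (l.length - 1)).reverse).find? (pvCondB l) with
    | none =>
      exact absurd hck ((List.find?_eq_none.mp hfb) _ hmemk)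
    | some k =>
      obtain ⟨hckk, hkm, hmax⟩ := pv_find?_pairwise hpb hfb
      have hkr : 2 ≤ k ∧ k ≤ l.length := by
        rw [List.mem_reverse, List.mem_range'_1] at hkm
        omega
      obtain ⟨hkdvd', hkper⟩ := (pvCondB_iff l k hkr.1 hkr.2).mp hckk
      obtain ⟨hq1, hq2, hq3, hq4, hq5⟩ := pv_div_facts l.length k hn1 hkr.1 hkr.2 hkdvd'
      -- maximality of k against n/d
      have hle1 : l.length / d ≤ k := by
        rcases hmax _ hmemk hck with h | h <;> omega
      -- minimality of d against n/k
      have hcd' : pvCondA l (l.length / k) = true :=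
        (pvCondA_iff l (l.length / k) hq1 (by omega)).mpr ⟨hq2, hq3, hkper⟩
      have hmemd : l.length / k ∈ List.range' 1 (l.length / 2 + 1) := by
        rw [List.mem_range'_1]
        omega
      have hle2 : d ≤ l.length / k := by
        rcases hmin _ hmemd hcd' with h | h <;> omega
      have hle3 : k ≤ l.length / d := by
        have h : l.length / (l.length / k) ≤ l.length / d :=
          Nat.div_le_div_left hle2 (by omega : 0 < d)
        rw [hq4] at h
        exact h
      have heq : l.length / d = k := by omega
      show ((l.length / d : Nat) : Int) = (k : Int)
      exact_mod_cast heq
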